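-- pv_equiv track=rewrite | github.com/py-AQA/python_hugs_group_74 | HW/Jan_Sha/Reverse_even_list.py | revSub
-- ===== SOURCE A (Python) =====
-- def revSub(my_list: list)-> list:
--     k = -1
--     for i, j in enumerate(my_list):
--         if j % 2 != 0:
--             continue
--         else:
--             if k == -1:
--                 k = i
--                 continue
--             else:
--                 a = my_list[k]
--                 my_list[k] = my_list[i]
--                 my_list[i] = a
--                 k = -1
--     return my_list
-- ===== SOURCE B (Python) =====
-- def revSub(my_list: list) -> list:
--     idx = [i for i, v in enumerate(my_list) if v % 2 == 0]
--     it = iter(idx)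
--     for a, b in zip(it, it):
--         my_list[a], my_list[b] = my_list[b], my_list[a]
--     return my_list
-- ===== Notes on version B (the rewrite author's own statement) =====
-- stated objective: simpler
-- what changed: A threads a -1/pending-index sentinel through one stateful loop that swaps as it scans; B first collects the even-element indices with a comprehension, then pairs them with zip(it, it) and swaps each pair, with no sentinel state.
import Mathlib
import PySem

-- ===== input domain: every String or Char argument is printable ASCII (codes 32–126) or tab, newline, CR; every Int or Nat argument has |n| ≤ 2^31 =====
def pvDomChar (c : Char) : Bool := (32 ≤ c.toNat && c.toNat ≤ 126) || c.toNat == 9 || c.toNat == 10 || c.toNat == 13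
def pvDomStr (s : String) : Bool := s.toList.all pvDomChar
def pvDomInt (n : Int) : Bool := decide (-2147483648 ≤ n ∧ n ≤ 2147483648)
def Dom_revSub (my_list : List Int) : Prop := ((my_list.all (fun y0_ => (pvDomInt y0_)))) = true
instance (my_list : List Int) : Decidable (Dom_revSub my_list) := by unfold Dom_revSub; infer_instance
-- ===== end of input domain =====

-- B collects the indices of even elements once, then swaps them two at a time;
-- same result as A by a plainer decomposition (objective: simpler).
-- Both Pythons mutate the argument in place the same way; the equivalence proved is about the return value.

-- ===== PORT A =====
-- state: (current list, k); k = -1 means "no pending even index"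
def revSub (my_list : List Int) : List Int :=
  ((PySem.List.enumerate my_list).foldl
    (fun (st : List Int × Int) (ij : Int × Int) =>
      if PySem.Int.mod ij.2 2 ≠ 0 then st
      else if st.2 = -1 then (st.1, ij.1)
      else
        let a := PySem.List.pyGetD st.1 st.2 0
        let l1 := PySem.List.pySetD st.1 st.2 (PySem.List.pyGetD st.1 ij.1 0)
        let l2 := PySem.List.pySetD l1 ij.1 a
        (l2, -1))
    (my_list, -1)).1

-- ===== PORT B =====
-- zip(it, it) on a single iterator groups the index list into consecutive pairs
def pairsOf : List Int → List (Int × Int)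
  | a :: b :: t => (a, b) :: pairsOf t
  | _ => []

def revSub_alt (my_list : List Int) : List Int :=
  let idx := (PySem.List.enumerate my_list).filterMap
    (fun p => if PySem.Int.mod p.2 2 = 0 then some p.1 else none)
  (pairsOf idx).foldl
    (fun lst ab =>
      PySem.List.pySetD
        (PySem.List.pySetD lst ab.1 (PySem.List.pyGetD lst ab.2 0))
        ab.2 (PySem.List.pyGetD lst ab.1 0))
    my_list

-- ===== PRECONDITION & SPEC =====
def Spec_revSub (my_list : List Int) (out : List Int) : Prop := out = revSub_alt my_list
instance (my_list : List Int) (out : List Int) : Decidable (Spec_revSub my_list out) := by unfold Spec_revSub; infer_instance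

-- ===== CLAIM (what is proved, stated in full; the proofs are below) =====
def Claim_equal_revSub : Prop := ∀ (my_list : List Int), Dom_revSub my_list → Spec_revSub my_list (revSub my_list)

-- ===== LEMMAS AND PROOFS =====

-- encode A's pending-index state: none ↦ -1, some n ↦ n
def encK : Option Int → Int
  | none => -1
  | some n => n

-- A's fold, started with pending state acc, performs exactly B's pairwise swaps
-- (indices are enumerate positions, so never the sentinel -1)
theorem foldA_eq (ps : List (Int × Int)) :
    ∀ (lst : List Int) (acc : Option Int),
    (∀ p ∈ ps, p.1 ≠ -1) → (∀ n, acc = some n → n ≠ -1) →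
    (ps.foldl
      (fun (st : List Int × Int) (ij : Int × Int) =>
        if PySem.Int.mod ij.2 2 ≠ 0 then st
        else if st.2 = -1 then (st.1, ij.1)
        else
          let a := PySem.List.pyGetD st.1 st.2 0
          let l1 := PySem.List.pySetD st.1 st.2 (PySem.List.pyGetD st.1 ij.1 0)
          let l2 := PySem.List.pySetD l1 ij.1 a
          (l2, -1))
      (lst, encK acc)).1 =
    (pairsOf (acc.toList ++ ps.filterMap
        (fun p => if PySem.Int.mod p.2 2 = 0 then some p.1 else none))).foldl
      (fun lst ab =>
        PySem.List.pySetD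
          (PySem.List.pySetD lst ab.1 (PySem.List.pyGetD lst ab.2 0))
          ab.2 (PySem.List.pyGetD lst ab.1 0))
      lst := by
  induction ps with
  | nil =>
      intro lst acc _ _
      cases acc <;> simp [pairsOf, encK]
  | cons p ps ih =>
      intro lst acc hp hacc
      by_cases h : PySem.Int.mod p.2 2 = 0
      · cases acc with
        | none =>
            simp only [List.foldl_cons, List.filterMap_cons, if_pos h, encK,
              if_neg (not_not_intro h)]
            simpa [encK] using ih lst (some p.1)
              (fun q hq => hp q (List.mem_cons_of_mem p hq))
              (fun n hn => by cases hn; exact hp p (List.mem_cons_self) )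
        | some n =>
            have hn : n ≠ -1 := hacc n rfl
            simp only [List.foldl_cons, List.filterMap_cons, if_pos h, encK,
              if_neg (not_not_intro h), if_neg hn]
            simpa [encK, pairsOf] using ih
              (PySem.List.pySetD
                (PySem.List.pySetD lst n (PySem.List.pyGetD lst p.1 0))
                p.1 (PySem.List.pyGetD lst n 0)) none
              (fun q hq => hp q (List.mem_cons_of_mem p hq))
              (fun _ hn' => by cases hn')
      · simp only [List.foldl_cons, List.filterMap_cons, if_neg h, if_pos h]
        exact ih lst acc (fun q hq => hp q (List.mem_cons_of_mem p hq)) hacc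

-- ===== VERDICT (by name: the statement is the Claim_ definition above) =====
theorem revSub_spec : Claim_equal_revSub := by
  intro my_list _
  show revSub my_list = revSub_alt my_list
  unfold revSub revSub_alt
  have hidx : ∀ p ∈ PySem.List.enumerate my_list 0, p.1 ≠ -1 := by
    intro p hp
    rcases (PySem.List.mem_enumerate_iff _ _ _).1 hp with ⟨k, hk, rfl⟩
    simp
  simpa [encK] using foldA_eq (PySem.List.enumerate my_list) my_list none hidx
    (fun _ h => by cases h)
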